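-- pv_equiv track=rewrite | github.com/dclairvoyance/Tucil2Stima | src/myConvexHull.py | findRightMost
-- ===== SOURCE A (Python) =====
-- def findRightMost(bucket):
--     # masukan: bucket berisi array of points, dengan point berupa tuple (x, y)
--     # keluaran: point paling kanan berdasarkan absis dan ordinat
--     rightmost = bucket[0]
--     for point in bucket:
--         if (point[0] > rightmost[0]):
--             rightmost = point
--         elif (point[0] == rightmost[0] and point[1] > rightmost[1]):
--             rightmost = point
--     return rightmost
-- ===== SOURCE B (Python) =====
-- def findRightMost(bucket):
--     # two-pass: first the maximum x, then the first point with that x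
--     # and the largest y among them
--     mx = max(p[0] for p in bucket)
--     best = None
--     for p in bucket:
--         if p[0] == mx and (best is None or p[1] > best[1]):
--             best = p
--     return best
-- ===== Notes on version B (the rewrite author's own statement) =====
-- stated objective: alternative
-- what changed: Replaces A's single pass with a lexicographic running accumulator by two passes: compute the maximum x with max(), then scan once for the first point with that x and the largest y.
import Mathlib
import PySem

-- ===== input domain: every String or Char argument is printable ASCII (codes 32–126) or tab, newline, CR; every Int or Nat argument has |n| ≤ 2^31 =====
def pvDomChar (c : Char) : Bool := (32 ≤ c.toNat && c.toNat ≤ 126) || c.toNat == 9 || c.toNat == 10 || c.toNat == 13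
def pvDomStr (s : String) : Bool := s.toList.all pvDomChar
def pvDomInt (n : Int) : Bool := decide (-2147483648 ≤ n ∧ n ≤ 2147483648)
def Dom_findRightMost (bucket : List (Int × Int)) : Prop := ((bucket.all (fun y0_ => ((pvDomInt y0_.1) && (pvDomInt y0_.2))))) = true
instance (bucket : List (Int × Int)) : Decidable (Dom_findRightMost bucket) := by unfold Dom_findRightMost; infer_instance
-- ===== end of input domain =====

-- B replaces A's single lexicographic-accumulator pass by two passes (max x, then
-- best y among the max-x points); equivalence is proved on nonempty buckets
-- (on [] both Pythons raise: A IndexError, B ValueError).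

-- ===== PORT A =====
-- the loop body of A: update the running rightmost point
def stepA (r p : Int × Int) : Int × Int :=
  if p.1 > r.1 then p else if p.1 = r.1 ∧ p.2 > r.2 then p else r

def findRightMost (bucket : List (Int × Int)) : Int × Int :=
  match bucket with
  | [] => (0, 0)  -- unreachable: Pre_ excludes [], where Python raises IndexError
  | h :: _ => bucket.foldl stepA h   -- rightmost = bucket[0]; for point in bucket: …

-- ===== PORT B =====
-- the loop body of B's second pass: first point with x = mx and maximal y
def stepB (mx : Int) (best : Option (Int × Int)) (p : Int × Int) : Option (Int × Int) :=
  match best with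
  | none => if p.1 = mx then some p else best
  | some b => if p.1 = mx ∧ p.2 > b.2 then some p else best

def findRightMost_alt (bucket : List (Int × Int)) : Int × Int :=
  match PySem.List.max? (bucket.map Prod.fst) (fun x => x) with
  | none => (0, 0)  -- unreachable: Pre_ excludes [], where Python's max raises ValueError
  | some mx => (bucket.foldl (stepB mx) none).getD (0, 0)

-- ===== PRECONDITION & SPEC =====
-- Pre_ excludes only the empty bucket, on which A raises IndexError (and B ValueError).
def Pre_findRightMost (bucket : List (Int × Int)) : Prop := bucket ≠ []
instance (bucket : List (Int × Int)) : Decidable (Pre_findRightMost bucket) := by unfold Pre_findRightMost; infer_instance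
def pvWitness_findRightMost : (List (Int × Int)) := [(1, 2), (3, 4), (3, 5)]

def Spec_findRightMost (bucket : List (Int × Int)) (out : Int × Int) : Prop := out = findRightMost_alt bucket
instance (bucket : List (Int × Int)) (out : Int × Int) : Decidable (Spec_findRightMost bucket out) := by unfold Spec_findRightMost; infer_instance

-- ===== CLAIM (what is proved, stated in full; the proofs are below) =====
def Claim_equal_findRightMost : Prop := ∀ (bucket : List (Int × Int)), Dom_findRightMost bucket → Pre_findRightMost bucket → Spec_findRightMost bucket (findRightMost bucket)

-- ===== LEMMAS AND PROOFS =====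

-- B's computation with the head point r pulled out: what B computes on r :: l
def bridge (r : Int × Int) (l : List (Int × Int)) : Int × Int :=
  ((r :: l).foldl (stepB ((l.map Prod.fst).foldl max r.1)) none).getD (0, 0)

theorem stepA_fst (r p : Int × Int) : (stepA r p).1 = max r.1 p.1 := by
  unfold stepA; split_ifs <;> omega

-- one step of A's loop commutes with B's two-pass shape
theorem step_bridge (mx : Int) (r p : Int × Int) (h : r.1 ≤ mx) (h' : p.1 ≤ mx) :
    stepB mx none (stepA r p) = stepB mx (stepB mx none r) p := by
  rcases lt_trichotomy r.1 p.1 with hx | hx | hx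
  · have hA : stepA r p = p := by simp [stepA, hx]
    rw [hA]
    by_cases hp : p.1 = mx
    · simp [stepB, hp, show r.1 ≠ mx by omega]
    · simp [stepB, hp, show r.1 ≠ mx by omega]
  · by_cases hy : p.2 > r.2
    · have hA : stepA r p = p := by simp [stepA, hx, hy]
      rw [hA]
      by_cases hp : p.1 = mx
      · simp [stepB, hp, show r.1 = mx by omega, hy]
      · simp [stepB, hp, show r.1 ≠ mx by omega]
    · have hA : stepA r p = r := by simp [stepA, hx, hy]
      rw [hA]
      by_cases hp : r.1 = mx
      · simp [stepB, hp, show p.1 = mx by omega, hy]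
      · simp [stepB, hp, show p.1 ≠ mx by omega]
  · have hA : stepA r p = r := by
      have h1 : ¬ p.1 > r.1 := by omega
      have h2 : ¬ (p.1 = r.1 ∧ p.2 > r.2) := by rintro ⟨h1, _⟩; omega
      simp [stepA, h1, h2]
    rw [hA]
    by_cases hr : r.1 = mx
    · simp [stepB, hr, show ¬ (p.1 = mx ∧ p.2 > r.2) from fun ⟨h1,_⟩ => by omega]
    · simp [stepB, hr, show p.1 ≠ mx by omega]

theorem foldl_stepA_eq_bridge (l : List (Int × Int)) (r : Int × Int) :
    l.foldl stepA r = bridge r l := by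
  induction l generalizing r with
  | nil => simp [bridge, stepB]
  | cons p t ih =>
    have hmx : (t.map Prod.fst).foldl max (max r.1 p.1) = ((p :: t).map Prod.fst).foldl max r.1 := by
      simp [List.foldl_cons]
    have hr : r.1 ≤ (t.map Prod.fst).foldl max (max r.1 p.1) := by
      have := (PySem.List.le_foldl_max (t.map Prod.fst) (max r.1 p.1)).1
      omega
    have hp : p.1 ≤ (t.map Prod.fst).foldl max (max r.1 p.1) := by
      have := (PySem.List.le_foldl_max (t.map Prod.fst) (max r.1 p.1)).1
      omega
    calc (p :: t).foldl stepA r = t.foldl stepA (stepA r p) := by simp [List.foldl_cons]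
      _ = bridge (stepA r p) t := ih (stepA r p)
      _ = bridge r (p :: t) := by
          unfold bridge
          rw [stepA_fst, hmx]
          rw [← hmx]
          congr 1
          simp only [List.foldl_cons]
          rw [step_bridge _ _ _ hr hp]

theorem alt_eq_bridge (h : Int × Int) (t : List (Int × Int)) :
    findRightMost_alt (h :: t) = bridge h t := by
  unfold findRightMost_alt bridge
  rw [show ((h :: t).map Prod.fst) = h.1 :: t.map Prod.fst from rfl,
      PySem.List.max?_id_cons]

theorem stepA_self (h : Int × Int) : stepA h h = h := by
  simp [stepA]

-- ===== VERDICT (by name: the statement is the Claim_ definition above) =====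
theorem findRightMost_spec : Claim_equal_findRightMost := by
  intro bucket _ hpre
  unfold Spec_findRightMost
  match bucket with
  | [] => exact absurd rfl hpre
  | h :: t =>
    show (h :: t).foldl stepA h = _
    rw [List.foldl_cons, stepA_self, foldl_stepA_eq_bridge, alt_eq_bridge]
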